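-- pv_equiv track=rewrite | github.com/rkechols/Advent2020 | day24/hex_tiles.py | count_black_neighbors
-- ===== SOURCE A (Python) =====
-- from typing import List, Set, Tuple
--
-- DIRECTIONS = {
-- 	"e": (1, 0),
-- 	"se": (1, -1),
-- 	"sw": (0, -1),
-- 	"w": (-1, 0),
-- 	"nw": (-1, 1),
-- 	"ne": (0, 1)
-- }
--
-- def count_black_neighbors(tile_loc: Tuple[int, int], black_tiles: Set[Tuple[int, int]]) -> int:
-- 	x, y = tile_loc
-- 	count = 0
-- 	for step_x, step_y in DIRECTIONS.values():
-- 		neighbor = (x + step_x, y + step_y)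
-- 		if neighbor in black_tiles:
-- 			count += 1
-- 	return count
-- ===== SOURCE B (Python) =====
-- from typing import Set, Tuple
--
-- DIRECTIONS = {
-- 	"e": (1, 0),
-- 	"se": (1, -1),
-- 	"sw": (0, -1),
-- 	"w": (-1, 0),
-- 	"nw": (-1, 1),
-- 	"ne": (0, 1)
-- }
--
-- _OFFSETS = frozenset(DIRECTIONS.values())
--
-- def count_black_neighbors(tile_loc: Tuple[int, int], black_tiles: Set[Tuple[int, int]]) -> int:
-- 	# Flip the loop: scan the black tiles once and test whether each one's
-- 	# offset from tile_loc is one of the six direction offsets.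
-- 	x, y = tile_loc
-- 	return sum(1 for bx, by in black_tiles if (bx - x, by - y) in _OFFSETS)
-- ===== Notes on version B (the rewrite author's own statement) =====
-- stated objective: alternative
-- what changed: B inverts the traversal: instead of looping over the six direction offsets and testing membership in the black-tile set, it scans the black tiles once and tests whether each tile's offset from tile_loc is one of the six direction offsets (a frozenset); a Pre_ requires the list representing the Python set argument to hold distinct elements, the set invariant.
import Mathlib
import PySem

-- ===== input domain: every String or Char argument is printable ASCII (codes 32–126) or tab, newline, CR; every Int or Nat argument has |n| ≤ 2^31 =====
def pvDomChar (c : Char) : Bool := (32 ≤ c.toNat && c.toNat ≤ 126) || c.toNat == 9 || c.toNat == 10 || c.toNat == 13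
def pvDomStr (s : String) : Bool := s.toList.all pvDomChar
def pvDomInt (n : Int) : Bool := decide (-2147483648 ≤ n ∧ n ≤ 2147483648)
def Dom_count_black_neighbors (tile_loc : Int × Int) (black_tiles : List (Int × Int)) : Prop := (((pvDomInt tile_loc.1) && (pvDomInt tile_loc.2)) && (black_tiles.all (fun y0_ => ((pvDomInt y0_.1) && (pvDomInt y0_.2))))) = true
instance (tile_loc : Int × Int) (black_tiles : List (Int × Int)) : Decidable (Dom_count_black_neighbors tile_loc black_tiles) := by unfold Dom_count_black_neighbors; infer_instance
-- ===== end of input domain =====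

-- B scans the black-tile set once, testing each tile's offset from tile_loc against the six
-- direction offsets, instead of A's loop over the six directions with a membership test each
-- (objective: alternative; same O(1)-directions vs O(|black_tiles|) trade at this tiny scale).

-- ===== PORT A =====
-- DIRECTIONS.values(), in insertion order
def pvDirections : List (Int × Int) := [(1, 0), (1, -1), (0, -1), (-1, 0), (-1, 1), (0, 1)]

def count_black_neighbors (tile_loc : Int × Int) (black_tiles : List (Int × Int)) : Int :=
  pvDirections.foldl
    (fun count d =>
      let neighbor : Int × Int := (tile_loc.1 + d.1, tile_loc.2 + d.2)
      if PySem.Set.contains black_tiles neighbor then count + 1 else count)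
    0

-- ===== PORT B =====
-- _OFFSETS = frozenset(DIRECTIONS.values())
def pvOffsets : PySem.Set (Int × Int) := PySem.Set.ofList pvDirections

def count_black_neighbors_alt (tile_loc : Int × Int) (black_tiles : List (Int × Int)) : Int :=
  black_tiles.foldl
    (fun acc b =>
      if PySem.Set.contains pvOffsets (b.1 - tile_loc.1, b.2 - tile_loc.2) then acc + 1 else acc)
    0

-- ===== PRECONDITION & SPEC =====
-- black_tiles is a Python set: its list representation holds distinct elements.
def Pre_count_black_neighbors (tile_loc : Int × Int) (black_tiles : List (Int × Int)) : Prop :=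
  black_tiles.Nodup
instance (tile_loc : Int × Int) (black_tiles : List (Int × Int)) : Decidable (Pre_count_black_neighbors tile_loc black_tiles) := by unfold Pre_count_black_neighbors; infer_instance

def pvWitness_count_black_neighbors : (Int × Int) × (List (Int × Int)) := ((0, 0), [(1, 0), (2, 2)])

def Spec_count_black_neighbors (tile_loc : Int × Int) (black_tiles : List (Int × Int)) (out : Int) : Prop := out = count_black_neighbors_alt tile_loc black_tiles
instance (tile_loc : Int × Int) (black_tiles : List (Int × Int)) (out : Int) : Decidable (Spec_count_black_neighbors tile_loc black_tiles out) := by unfold Spec_count_black_neighbors; infer_instance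

-- ===== CLAIM (what is proved, stated in full; the proofs are below) =====
def Claim_equal_count_black_neighbors : Prop := ∀ (tile_loc : Int × Int) (black_tiles : List (Int × Int)), Dom_count_black_neighbors tile_loc black_tiles → Pre_count_black_neighbors tile_loc black_tiles → Spec_count_black_neighbors tile_loc black_tiles (count_black_neighbors tile_loc black_tiles)

-- ===== LEMMAS AND PROOFS =====

-- A's counting fold is countP over the direction list.
theorem countA_eq_countP (tl : Int × Int) (bt : List (Int × Int)) :
    count_black_neighbors tl bt =
      ((pvDirections.countP (fun d => decide ((tl.1 + d.1, tl.2 + d.2) ∈ bt))) : Int) := by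
  simp [count_black_neighbors, pvDirections, List.countP, List.countP.go,
    PySem.Set.contains]
  split_ifs <;> simp_all

-- B's counting fold is countP over the black-tile list.
theorem countB_eq_countP (tl : Int × Int) (bt : List (Int × Int)) :
    count_black_neighbors_alt tl bt =
      ((bt.countP (fun b => decide ((b.1 - tl.1, b.2 - tl.2) ∈ pvDirections))) : Int) := by
  rw [count_black_neighbors_alt, PySem.List.foldl_count_if, zero_add]
  congr 1
  apply List.countP_congr
  intro b _
  simp [pvOffsets, PySem.Set.contains, pvDirections, PySem.Set.ofList, PySem.Set.add]

-- symmetric counting on nodup lists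
theorem countP_mem_comm (l1 l2 : List (Int × Int))
    (h1 : l1.Nodup) (h2 : l2.Nodup) :
    l1.countP (fun a => decide (a ∈ l2)) = l2.countP (fun a => decide (a ∈ l1)) := by
  have key : ∀ (a b : List (Int × Int)), a.Nodup →
      a.countP (fun x => decide (x ∈ b)) = (a.toFinset ∩ b.toFinset).card := by
    intro a b ha
    rw [List.countP_eq_length_filter]
    have hnd : (a.filter (fun x => decide (x ∈ b))).Nodup := ha.filter _
    rw [← List.toFinset_card_of_nodup hnd, List.toFinset_filter]
    congr 1
    ext x
    simp [Finset.mem_inter]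
  rw [key _ _ h1, key _ _ h2, Finset.inter_comm]

theorem count_black_neighbors_spec' (tl : Int × Int) (bt : List (Int × Int))
    (hnd : bt.Nodup) :
    count_black_neighbors tl bt = count_black_neighbors_alt tl bt := by
  rw [countA_eq_countP, countB_eq_countP]
  have hmap : pvDirections.countP (fun d => decide ((tl.1 + d.1, tl.2 + d.2) ∈ bt)) =
      (pvDirections.map (fun d => (tl.1 + d.1, tl.2 + d.2))).countP
        (fun n => decide (n ∈ bt)) := by
    rw [List.countP_map]
    rfl
  have hinj : Function.Injective (fun d : Int × Int => (tl.1 + d.1, tl.2 + d.2)) := by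
    intro a b hab
    simp only [Prod.mk.injEq] at hab
    exact Prod.ext (by omega) (by omega)
  have hndm : (pvDirections.map (fun d => (tl.1 + d.1, tl.2 + d.2))).Nodup := by
    refine List.Nodup.map hinj ?_
    decide
  rw [hmap]
  congr 1
  rw [countP_mem_comm _ bt hndm hnd]
  apply List.countP_congr
  intro b _
  simp only [decide_eq_true_eq, List.mem_map]
  constructor
  · rintro ⟨d, hd, rfl⟩
    simpa using hd
  · intro h
    exact ⟨(b.1 - tl.1, b.2 - tl.2), h, by simp⟩

-- ===== VERDICT (by name: the statement is the Claim_ definition above) =====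
theorem count_black_neighbors_spec : Claim_equal_count_black_neighbors := by
  intro tl bt _ hpre
  exact count_black_neighbors_spec' tl bt hpre
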